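-- pv_equiv track=rewrite | github.com/checkertron-coder/createstage-quoting-app | backend/calculators/material_lookup.py | _extract_shape
-- ===== SOURCE A (Python) =====
-- def _extract_shape(profile):
--     """
--     Extract the shape family from a profile key.
--     e.g. 'sq_tube_2x2_11ga' -> 'sq_tube'
--          'flat_bar_1x0.25' -> 'flat_bar'
--          'round_tube_1.5_14ga' -> 'round_tube'
--          'pipe_4_sch40' -> 'pipe'
--     """
--     if not profile:
--         return ""
--     # Known multi-word shape prefixes (order matters — longest first)
--     prefixes = [
--         "al_sq_tube", "al_rect_tube", "al_round_tube",
--         "al_flat_bar", "al_angle", "al_sheet",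
--         "sq_tube", "rect_tube", "round_tube",
--         "sq_bar", "round_bar", "flat_bar",
--         "dom_tube", "angle", "channel", "pipe", "hss",
--     ]
--     for prefix in prefixes:
--         if profile.startswith(prefix + "_") or profile == prefix:
--             return prefix
--     # Fallback: first segment before underscore
--     parts = profile.split("_")
--     return parts[0] if parts else ""
-- ===== SOURCE B (Python) =====
-- # Trie of known shape prefixes, keyed segment by segment; an empty dict marks
-- # the end of a known prefix (no known prefix extends another).
-- _TRIE = {
--     "al": {
--         "sq": {"tube": {}},
--         "rect": {"tube": {}},
--         "round": {"tube": {}},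
--         "flat": {"bar": {}},
--         "angle": {},
--         "sheet": {},
--     },
--     "sq": {"tube": {}, "bar": {}},
--     "rect": {"tube": {}},
--     "round": {"tube": {}, "bar": {}},
--     "flat": {"bar": {}},
--     "dom": {"tube": {}},
--     "angle": {},
--     "channel": {},
--     "pipe": {},
--     "hss": {},
-- }
--
--
-- def _extract_shape(profile):
--     if not profile:
--         return ""
--     parts = profile.split("_")
--     node = _TRIE
--     for i, word in enumerate(parts):
--         node = node.get(word)
--         if node is None:
--             break
--         if not node:  # reached the end of a known prefix
--             return "_".join(parts[:i + 1])
--     return parts[0]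
-- ===== Notes on version B (the rewrite author's own statement) =====
-- stated objective: alternative
-- what changed: Instead of scanning the 17-element prefix list with startswith on each entry, B splits the profile once on the underscore separator and walks a precomputed word-level trie (dict of dicts) segment by segment, returning the joined consumed segments when it reaches an empty node; correctness relies on no known prefix being a segment-prefix of another, so the unique trie path equals A's first list match.
import Mathlib
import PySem

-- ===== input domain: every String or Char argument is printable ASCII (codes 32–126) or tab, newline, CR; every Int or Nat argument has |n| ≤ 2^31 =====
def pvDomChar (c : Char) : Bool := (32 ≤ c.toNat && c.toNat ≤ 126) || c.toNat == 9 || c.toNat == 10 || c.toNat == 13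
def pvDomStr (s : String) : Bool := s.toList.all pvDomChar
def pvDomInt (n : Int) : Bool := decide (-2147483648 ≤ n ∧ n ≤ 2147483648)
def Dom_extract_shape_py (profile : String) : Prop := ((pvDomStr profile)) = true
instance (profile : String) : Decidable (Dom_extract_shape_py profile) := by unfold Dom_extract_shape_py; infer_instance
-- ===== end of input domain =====

-- B replaces A's 17-way startswith scan by a segment trie (dict of dicts keyed word by word):
-- split once on '_' and walk the trie; an empty node marks the end of a known prefix. Same value always.


-- ===== PORT A =====
-- A's literal prefix list, in order
def prefixesA : List (List Char) :=
  ["al_sq_tube".toList, "al_rect_tube".toList, "al_round_tube".toList,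
   "al_flat_bar".toList, "al_angle".toList, "al_sheet".toList,
   "sq_tube".toList, "rect_tube".toList, "round_tube".toList,
   "sq_bar".toList, "round_bar".toList, "flat_bar".toList,
   "dom_tube".toList, "angle".toList, "channel".toList, "pipe".toList, "hss".toList]

-- A's for-loop: first prefix with profile.startswith(prefix + "_") or profile == prefix
def loopA (cs : List Char) : List (List Char) → Option (List Char)
  | [] => none
  | p :: ps =>
    if (PySem.Chars.startswith cs (p ++ ['_']) || cs == p) then some p else loopA cs ps

def extract_shape_py (profile : String) : String :=
  let cs := profile.toList
  if cs = [] then "" else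
  match loopA cs prefixesA with
  | some p => String.ofList p
  | none =>
    -- parts = profile.split("_"); return parts[0] if parts else ""
    match PySem.Chars.splitOn cs ['_'] with
    | [] => ""
    | p :: _ => String.ofList p

-- ===== PORT B =====
-- a trie node: the Python dict {word: child-dict, ...}; nil = the empty dict
inductive PKids where
  | nil : PKids
  | cons : List Char → PKids → PKids → PKids
deriving DecidableEq, Repr

def PKids.mk : List (List Char × PKids) → PKids
  | [] => .nil
  | (w, t) :: r => .cons w t (PKids.mk r)

-- node.get(word)
def PKids.get? : PKids → List Char → Option PKids
  | .nil, _ => none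
  | .cons w t rest, k => if k = w then some t else PKids.get? rest k

-- B's _TRIE literal, word by word
def trieB : PKids := PKids.mk
  [("al".toList, PKids.mk
      [("sq".toList, PKids.mk [("tube".toList, .nil)]),
       ("rect".toList, PKids.mk [("tube".toList, .nil)]),
       ("round".toList, PKids.mk [("tube".toList, .nil)]),
       ("flat".toList, PKids.mk [("bar".toList, .nil)]),
       ("angle".toList, .nil),
       ("sheet".toList, .nil)]),
   ("sq".toList, PKids.mk [("tube".toList, .nil), ("bar".toList, .nil)]),
   ("rect".toList, PKids.mk [("tube".toList, .nil)]),
   ("round".toList, PKids.mk [("tube".toList, .nil), ("bar".toList, .nil)]),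
   ("flat".toList, PKids.mk [("bar".toList, .nil)]),
   ("dom".toList, PKids.mk [("tube".toList, .nil)]),
   ("angle".toList, .nil),
   ("channel".toList, .nil),
   ("pipe".toList, .nil),
   ("hss".toList, .nil)]

-- B's for-loop: node = node.get(word); break on None; on an empty node return "_".join(parts[:i+1])
def goB (node : PKids) (consumed : List (List Char)) : List (List Char) → Option (List Char)
  | [] => none
  | w :: ws =>
    match PKids.get? node w with
    | none => none                                   -- break
    | some PKids.nil => some (PySem.Chars.join ['_'] (consumed ++ [w]))
    | some (PKids.cons a b c) => goB (PKids.cons a b c) (consumed ++ [w]) ws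

def extract_shape_py_alt (profile : String) : String :=
  let cs := profile.toList
  if cs = [] then "" else
  let parts := PySem.Chars.splitOn cs ['_']
  match goB trieB [] parts with
  | some r => String.ofList r
  | none => String.ofList (parts.headD [])           -- return parts[0] (split is never empty)

-- ===== PRECONDITION & SPEC =====
def Spec_extract_shape_py (profile : String) (out : String) : Prop := out = extract_shape_py_alt profile
instance (profile : String) (out : String) : Decidable (Spec_extract_shape_py profile out) := by unfold Spec_extract_shape_py; infer_instance

-- ===== CLAIM (what is proved, stated in full; the proofs are below) =====
def Claim_equal_extract_shape_py : Prop := ∀ (profile : String), Dom_extract_shape_py profile → Spec_extract_shape_py profile (extract_shape_py profile)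

-- ===== LEMMAS AND PROOFS =====

-- reference model of Python's split("_"): simple structural recursion
def ssplit : List Char → List (List Char)
  | [] => [[]]
  | c :: r => if c = '_' then [] :: ssplit r else (ssplit r).modifyHead (c :: ·)

theorem ssplit_ne_nil (cs : List Char) : ssplit cs ≠ [] := by
  induction cs with
  | nil => simp [ssplit]
  | cons c r ih =>
    simp only [ssplit]
    split
    · simp
    · cases h : ssplit r with
      | nil => exact absurd h ih
      | cons a t => simp

theorem ssplit_cons_ex (r : List Char) : ∃ a t, ssplit r = a :: t := by
  cases h : ssplit r with
  | nil => exact absurd h (ssplit_ne_nil r)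
  | cons a t => exact ⟨a, t, rfl⟩

theorem splitOn_go_eq (l : List Char) :
    ∀ (fuel : Nat) (cur : List Char) (acc : List (List Char)), l.length ≤ fuel →
      PySem.Chars.splitOn.go ['_'] fuel l cur acc
        = acc.reverse ++ (ssplit l).modifyHead (cur.reverse ++ ·) := by
  induction l with
  | nil =>
    intro fuel cur acc _
    cases fuel <;> simp [PySem.Chars.splitOn.go, ssplit]
  | cons c r ih =>
    intro fuel cur acc hf
    cases fuel with
    | zero => simp at hf
    | succ f =>
      have hf' : r.length ≤ f := by simpa using hf
      rw [PySem.Chars.splitOn.go]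
      by_cases hc : c = '_'
      · subst hc
        have hpre : List.isPrefixOf ['_'] ('_' :: r) = true := by simp [List.isPrefixOf]
        rw [if_pos hpre]
        simp only [List.length_cons, List.length_nil, List.drop_succ_cons, List.drop_zero]
        rw [ih f [] (cur.reverse :: acc) (by simpa using hf')]
        obtain ⟨a, t, h⟩ := ssplit_cons_ex r
        simp [ssplit, h]
      · have hpre : List.isPrefixOf ['_'] (c :: r) = false := by
          simp [List.isPrefixOf]
          intro h; exact absurd h.symm hc
        rw [if_neg (by simp [hpre])]
        rw [ih f (c :: cur) acc hf']
        obtain ⟨a, t, h⟩ := ssplit_cons_ex r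
        simp [ssplit, h, hc]

theorem splitOn_eq (cs : List Char) : PySem.Chars.splitOn cs ['_'] = ssplit cs := by
  rw [PySem.Chars.splitOn, splitOn_go_eq cs (cs.length + 1) [] [] (by omega)]
  obtain ⟨a, t, h⟩ := ssplit_cons_ex cs
  simp [h]

theorem ssplit_no_sep (cs : List Char) : ∀ s ∈ ssplit cs, '_' ∉ s := by
  induction cs with
  | nil => simp [ssplit]
  | cons c r ih =>
    obtain ⟨a, t, h⟩ := ssplit_cons_ex r
    by_cases hc : c = '_'
    · simp only [ssplit, if_pos hc]
      intro s hs
      rcases List.mem_cons.mp hs with rfl | hmem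
      · simp
      · exact ih s hmem
    · simp only [ssplit, if_neg hc, h, List.modifyHead]
      rw [h] at ih
      intro s hs
      rcases List.mem_cons.mp hs with rfl | hmem
      · intro hm
        rcases List.mem_cons.mp hm with heq | hmem2
        · exact hc heq.symm
        · exact ih a List.mem_cons_self hmem2
      · exact ih s (List.mem_cons_of_mem a hmem)

theorem join_ssplit (cs : List Char) : PySem.Chars.join ['_'] (ssplit cs) = cs := by
  induction cs with
  | nil => simp [ssplit, PySem.Chars.join_singleton]
  | cons c r ih =>
    obtain ⟨a, t, h⟩ := ssplit_cons_ex r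
    by_cases hc : c = '_'
    · subst hc
      rw [show ssplit ('_' :: r) = [] :: (a :: t) from by simp [ssplit, h]]
      rw [PySem.Chars.join_cons_cons]
      rw [h] at ih
      simp [ih]
    · simp only [ssplit, if_neg hc, h, List.modifyHead]
      rw [h] at ih
      cases t with
      | nil =>
        rw [PySem.Chars.join_singleton]
        rw [PySem.Chars.join_singleton] at ih
        simp [ih]
      | cons b t' =>
        rw [PySem.Chars.join_cons_cons] at ih ⊢
        rw [← ih]
        simp

theorem ssplit_append {a : List Char} (b : List Char) (h : '_' ∉ a) :
    ssplit (a ++ b) = (ssplit b).modifyHead (a ++ ·) := by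
  induction a with
  | nil =>
    cases hb : ssplit b <;> simp [hb]
  | cons c a' ih =>
    have hc : c ≠ '_' := by intro hc; exact h (hc ▸ List.mem_cons_self)
    have h' : '_' ∉ a' := fun hm => h (List.mem_cons_of_mem c hm)
    simp only [List.cons_append, ssplit, if_neg hc, ih h', List.modifyHead_modifyHead]
    obtain ⟨x, t, hb⟩ := ssplit_cons_ex b
    simp [hb, Function.comp]

theorem ssplit_join {L : List (List Char)} (hne : L ≠ []) (hf : ∀ s ∈ L, '_' ∉ s) :
    ssplit (PySem.Chars.join ['_'] L) = L := by
  induction L with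
  | nil => exact absurd rfl hne
  | cons x L' ih =>
    cases L' with
    | nil =>
      rw [PySem.Chars.join_singleton]
      have := ssplit_append [] (hf x List.mem_cons_self)
      simpa [ssplit] using this
    | cons y L'' =>
      rw [PySem.Chars.join_cons_cons]
      have hx : '_' ∉ x := hf x List.mem_cons_self
      have hrest := ih (by simp) (fun s hs => hf s (List.mem_cons_of_mem x hs))
      rw [List.append_assoc, ssplit_append _ hx]
      simp only [List.singleton_append, ssplit, hrest, List.modifyHead]
      simp

theorem join_append {a b : List (List Char)} (ha : a ≠ []) (hb : b ≠ []) :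
    PySem.Chars.join ['_'] (a ++ b)
      = PySem.Chars.join ['_'] a ++ '_' :: PySem.Chars.join ['_'] b := by
  induction a with
  | nil => exact absurd rfl ha
  | cons x a' ih =>
    cases a' with
    | nil =>
      cases b with
      | nil => exact absurd rfl hb
      | cons y b' =>
        simp only [List.singleton_append, PySem.Chars.join_cons_cons, PySem.Chars.join_singleton]
        simp
    | cons z a'' =>
      have := ih (by simp)
      simp only [List.cons_append] at this ⊢
      rw [PySem.Chars.join_cons_cons, this, PySem.Chars.join_cons_cons]
      simp

-- A's per-prefix test, characterised through ssplit
theorem match_iff (cs p : List Char) (h2 : ∀ s ∈ ssplit p, '_' ∉ s) :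
    (PySem.Chars.startswith cs (p ++ ['_']) || cs == p) = true
      ↔ (ssplit cs).take (ssplit p).length = ssplit p := by
  constructor
  · intro h
    rcases Bool.or_eq_true_iff.mp h with h | h
    · obtain ⟨r, hr⟩ := (PySem.Chars.startswith_iff _ _).mp h
      have hjoin : cs = PySem.Chars.join ['_'] (ssplit p ++ ssplit r) := by
        rw [join_append (ssplit_ne_nil p) (ssplit_ne_nil r), join_ssplit, join_ssplit]
        rw [← hr]
        simp
      have hsp : ssplit cs = ssplit p ++ ssplit r := by
        rw [hjoin]
        exact ssplit_join (by simp [ssplit_ne_nil p]) (by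
          intro s hs
          rcases List.mem_append.mp hs with h' | h'
          · exact h2 s h'
          · exact ssplit_no_sep r s h')
      rw [hsp, List.take_left]
    · have : cs = p := by simpa using h
      subst this
      exact List.take_length ..
  · intro h
    have hds : ssplit cs = ssplit p ++ (ssplit cs).drop (ssplit p).length := by
      conv_lhs => rw [← List.take_append_drop (ssplit p).length (ssplit cs), h]
    cases hd : (ssplit cs).drop (ssplit p).length with
    | nil =>
      have : cs = p := by
        rw [← join_ssplit cs, hds, hd, List.append_nil, join_ssplit]
      simp [this]
    | cons d ds =>
      have : cs = p ++ '_' :: PySem.Chars.join ['_'] (d :: ds) := by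
        rw [← join_ssplit cs, hds, hd, join_append (ssplit_ne_nil p) (by simp), join_ssplit]
      apply Bool.or_eq_true_iff.mpr
      left
      rw [PySem.Chars.startswith_iff, this]
      exact ⟨PySem.Chars.join ['_'] (d :: ds), by simp⟩

theorem loopA_eq (cs : List Char) (ps : List (List Char))
    (h : ∀ p ∈ ps, ∀ s ∈ ssplit p, '_' ∉ s) :
    loopA cs ps = ps.find? (fun p => decide ((ssplit cs).take (ssplit p).length = ssplit p)) := by
  induction ps with
  | nil => rfl
  | cons p ps ih =>
    rw [loopA, List.find?]
    have hiff := match_iff cs p (h p List.mem_cons_self)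
    by_cases hc : (ssplit cs).take (ssplit p).length = ssplit p
    · rw [if_pos (hiff.mpr hc), decide_eq_true hc]
    · rw [if_neg (by
        intro hh
        exact hc (hiff.mp (by simpa using hh)))]
      rw [decide_eq_false hc]
      exact ih (fun q hq => h q (List.mem_cons_of_mem p hq))

theorem find?_unique {α : Type} (C : α → Bool) {l : List α} {x : α}
    (hx : x ∈ l) (hC : C x = true) (hu : ∀ y ∈ l, C y = true → y = x) :
    l.find? C = some x := by
  induction l with
  | nil => simp at hx
  | cons a l ih =>
    rw [List.find?]
    by_cases ha : C a = true
    · rw [ha]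
      simp [hu a List.mem_cons_self ha]
    · rw [Bool.eq_false_iff.mpr ha]
      rcases List.mem_cons.mp hx with rfl | hx'
      · exact absurd hC ha
      · exact ih hx' (fun y hy => hu y (List.mem_cons_of_mem a hy))

theorem prefixes_free : ∀ p ∈ prefixesA, ∀ s ∈ ssplit p, '_' ∉ s := by decide

theorem prefixes_noprefix : ∀ p ∈ prefixesA, ∀ q ∈ prefixesA,
    (ssplit p).take (ssplit q).length = ssplit q → q = p := by decide

-- two matching prefixes are equal when the second's segment count is ≤ the first's
theorem match_unique (S : List (List Char)) (p q : List Char)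
    (hp : p ∈ prefixesA) (hq : q ∈ prefixesA)
    (hpm : S.take (ssplit p).length = ssplit p)
    (hqm : S.take (ssplit q).length = ssplit q)
    (hle : (ssplit q).length ≤ (ssplit p).length) : q = p := by
  apply prefixes_noprefix p hp q hq
  have : (ssplit p).take (ssplit q).length = S.take (ssplit q).length := by
    rw [← hpm, List.take_take, Nat.min_eq_left hle]
  rw [this, hqm]

-- ===== trie lemmas =====

-- word-paths of a trie: the segment sequences leading to an empty node
def PKids.paths : PKids → List (List (List Char))
  | .nil => []
  | .cons w PKids.nil rest => [w] :: PKids.paths rest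
  | .cons w (PKids.cons a b c) rest =>
      ((PKids.cons a b c).paths.map (w :: ·)) ++ rest.paths

def PKids.hasKey : PKids → List Char → Bool
  | .nil, _ => false
  | .cons w _ rest, k => decide (k = w) || PKids.hasKey rest k

-- well-formed: keys distinct at every node
def PKids.wfb : PKids → Bool
  | .nil => true
  | .cons w t rest => !(rest.hasKey w) && PKids.wfb t && PKids.wfb rest

theorem paths_ne_nil (ch : PKids) : ∀ p ∈ ch.paths, p ≠ [] := by
  induction ch with
  | nil => simp [PKids.paths]
  | cons w t rest iht ihr =>
    cases t with
    | nil =>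
      simp only [PKids.paths]
      intro p hp
      rcases List.mem_cons.mp hp with rfl | h
      · simp
      · exact ihr p h
    | cons a b c =>
      simp only [PKids.paths]
      intro p hp
      rcases List.mem_append.mp hp with h | h
      · obtain ⟨q, _, rfl⟩ := List.mem_map.mp h
        simp
      · exact ihr p h

theorem hasKey_of_mem (ch : PKids) (w : List Char) (p : List (List Char))
    (h : (w :: p) ∈ ch.paths) : ch.hasKey w = true := by
  induction ch with
  | nil => simp [PKids.paths] at h
  | cons w' t rest iht ihr =>
    cases t with
    | nil =>
      simp only [PKids.paths] at h
      rcases List.mem_cons.mp h with heq | h'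
      · obtain ⟨rfl, -⟩ := List.cons.inj heq
        simp [PKids.hasKey]
      · simp [PKids.hasKey, ihr h']
    | cons a b c =>
      simp only [PKids.paths] at h
      rcases List.mem_append.mp h with h' | h'
      · obtain ⟨q, _, heq⟩ := List.mem_map.mp h'
        obtain ⟨rfl, -⟩ := List.cons.inj heq
        simp [PKids.hasKey]
      · simp [PKids.hasKey, ihr h']

-- forward membership: a found child's paths extend to the parent's
theorem mem_paths_get?_nil (ch : PKids) (w : List Char)
    (h : ch.get? w = some PKids.nil) : [w] ∈ ch.paths := by
  induction ch with
  | nil => simp [PKids.get?] at h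
  | cons w' t rest iht ihr =>
    rw [PKids.get?] at h
    by_cases hw : w = w'
    · rw [if_pos hw] at h
      obtain rfl := Option.some.inj h
      subst hw
      simp [PKids.paths]
    · rw [if_neg hw] at h
      cases t with
      | nil => simp [PKids.paths, ihr h]
      | cons a b c =>
        simp only [PKids.paths]
        exact List.mem_append.mpr (Or.inr (ihr h))

theorem mem_paths_get?_cons (ch : PKids) (w : List Char) (t : PKids) (p : List (List Char))
    (h : ch.get? w = some t) (hp : p ∈ t.paths) : (w :: p) ∈ ch.paths := by
  induction ch with
  | nil => simp [PKids.get?] at h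
  | cons w' t' rest iht ihr =>
    rw [PKids.get?] at h
    by_cases hw : w = w'
    · rw [if_pos hw] at h
      replace h := Option.some.inj h
      subst h
      subst hw
      cases t' with
      | nil => simp [PKids.paths] at hp
      | cons a b c =>
        simp only [PKids.paths]
        exact List.mem_append.mpr (Or.inl (List.mem_map.mpr ⟨p, hp, rfl⟩))
    · rw [if_neg hw] at h
      cases t' with
      | nil =>
        simp only [PKids.paths]
        exact List.mem_cons_of_mem _ (ihr h)
      | cons a b c =>
        simp only [PKids.paths]
        exact List.mem_append.mpr (Or.inr (ihr h))

-- backward: in a well-formed trie, a path's first word is found and the rest is a child path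
theorem get?_of_mem_paths (ch : PKids) (w : List Char) (p : List (List Char))
    (hwf : ch.wfb = true) (h : (w :: p) ∈ ch.paths) :
    ∃ t, ch.get? w = some t ∧ ((p = [] ∧ t = PKids.nil) ∨ (p ≠ [] ∧ p ∈ t.paths ∧ t ≠ PKids.nil)) := by
  induction ch with
  | nil => simp [PKids.paths] at h
  | cons w' t' rest iht ihr =>
    rw [PKids.wfb, Bool.and_eq_true, Bool.and_eq_true] at hwf
    obtain ⟨⟨hnk, hwt⟩, hwr⟩ := hwf
    cases t' with
    | nil =>
      simp only [PKids.paths] at h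
      rcases List.mem_cons.mp h with heq | h'
      · obtain ⟨rfl, rfl⟩ := List.cons.inj heq
        exact ⟨PKids.nil, by simp [PKids.get?], Or.inl ⟨rfl, rfl⟩⟩
      · have hne : w ≠ w' := by
          intro hww
          subst hww
          have := hasKey_of_mem rest w p h'
          simp [this] at hnk
        obtain ⟨t, ht, hc⟩ := ihr hwr h'
        exact ⟨t, by rw [PKids.get?, if_neg hne]; exact ht, hc⟩
    | cons a b c =>
      simp only [PKids.paths] at h
      rcases List.mem_append.mp h with h' | h'
      · obtain ⟨q, hq, heq⟩ := List.mem_map.mp h'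
        obtain ⟨rfl, rfl⟩ := List.cons.inj heq
        refine ⟨PKids.cons a b c, by simp [PKids.get?], Or.inr ⟨?_, hq, by simp⟩⟩
        exact paths_ne_nil _ q hq
      · have hne : w ≠ w' := by
          intro hww
          subst hww
          have := hasKey_of_mem rest w p h'
          simp [this] at hnk
        obtain ⟨t, ht, hc⟩ := ihr hwr h'
        exact ⟨t, by rw [PKids.get?, if_neg hne]; exact ht, hc⟩

theorem wfb_get? (ch : PKids) (w : List Char) (t : PKids)
    (hwf : ch.wfb = true) (h : ch.get? w = some t) : t.wfb = true := by
  induction ch with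
  | nil => simp [PKids.get?] at h
  | cons w' t' rest iht ihr =>
    rw [PKids.wfb, Bool.and_eq_true, Bool.and_eq_true] at hwf
    obtain ⟨⟨-, hwt⟩, hwr⟩ := hwf
    rw [PKids.get?] at h
    by_cases hw : w = w'
    · rw [if_pos hw] at h
      obtain rfl := Option.some.inj h
      exact hwt
    · rw [if_neg hw] at h
      exact ihr hwr h

-- soundness of the trie walk
theorem goB_some (parts : List (List Char)) : ∀ (ch : PKids) (consumed : List (List Char))
    (r : List Char), goB ch consumed parts = some r →
    ∃ path ∈ ch.paths, parts.take path.length = path ∧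
      r = PySem.Chars.join ['_'] (consumed ++ path) := by
  induction parts with
  | nil => intro ch consumed r h; simp [goB] at h
  | cons w ws ih =>
    intro ch consumed r h
    rw [goB] at h
    cases hg : ch.get? w with
    | none => rw [hg] at h; simp at h
    | some t =>
      rw [hg] at h
      cases t with
      | nil =>
        simp only [Option.some.injEq] at h
        exact ⟨[w], mem_paths_get?_nil ch w hg, by simp, h.symm⟩
      | cons a b c =>
        obtain ⟨path, hmem, htake, hr⟩ := ih (PKids.cons a b c) (consumed ++ [w]) r h
        refine ⟨w :: path, mem_paths_get?_cons ch w _ path hg hmem, ?_, ?_⟩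
        · simp [htake]
        · rw [hr]; simp

-- completeness of the trie walk
theorem goB_complete (parts : List (List Char)) : ∀ (ch : PKids) (consumed path : List (List Char)),
    ch.wfb = true → path ∈ ch.paths → parts.take path.length = path →
    goB ch consumed parts = some (PySem.Chars.join ['_'] (consumed ++ path)) := by
  induction parts with
  | nil =>
    intro ch consumed path hwf hmem htake
    have hne := paths_ne_nil ch path hmem
    simp at htake
    exact absurd htake hne
  | cons w ws ih =>
    intro ch consumed path hwf hmem htake
    cases path with
    | nil => exact absurd rfl (paths_ne_nil ch [] hmem)
    | cons w' p' =>
      have hw : w' = w := by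
        have := congrArg (fun l => l.headD []) htake
        simpa using this.symm
      subst hw
      have htake' : ws.take p'.length = p' := by
        simpa using htake
      obtain ⟨t, hget, hc⟩ := get?_of_mem_paths ch w' p' hwf hmem
      rw [goB, hget]
      rcases hc with ⟨rfl, rfl⟩ | ⟨hpne, hp, htne⟩
      · simp
      · cases t with
        | nil => exact absurd rfl htne
        | cons a b c =>
          show goB (PKids.cons a b c) (consumed ++ [w']) ws
              = some (PySem.Chars.join ['_'] (consumed ++ w' :: p'))
          rw [ih (PKids.cons a b c) (consumed ++ [w']) p' (wfb_get? ch w' _ hwf hget) hp htake']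
          simp

-- concrete facts about B's trie (decided on the literals)
theorem trie_wf : PKids.wfb trieB = true := by decide

theorem trie_paths_sub : ∀ path ∈ PKids.paths trieB, ∃ p ∈ prefixesA, ssplit p = path := by decide

theorem prefixes_sub_trie : ∀ p ∈ prefixesA, ssplit p ∈ PKids.paths trieB := by decide

-- the core: A's scan (as a find?) equals B's trie walk, after split
theorem core (S : List (List Char)) :
    ((prefixesA.find? (fun p => decide (S.take (ssplit p).length = ssplit p))).getD (S.headD []))
      = (match goB trieB [] S with
         | some r => r
         | none => S.headD []) := by
  by_cases hm : ∃ p ∈ prefixesA, S.take (ssplit p).length = ssplit p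
  · obtain ⟨p, hp, hmatch⟩ := hm
    have hfind : prefixesA.find? (fun q => decide (S.take (ssplit q).length = ssplit q)) = some p := by
      apply find?_unique _ hp (decide_eq_true hmatch)
      intro q hq hqd
      have hqm := of_decide_eq_true hqd
      rcases Nat.le_total (ssplit q).length (ssplit p).length with hle | hle
      · exact match_unique S p q hp hq hmatch hqm hle
      · exact (match_unique S q p hq hp hqm hmatch hle).symm
    have hgo : goB trieB [] S = some (PySem.Chars.join ['_'] ([] ++ ssplit p)) :=
      goB_complete S trieB [] (ssplit p) trie_wf (prefixes_sub_trie p hp) hmatch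
    rw [hfind, hgo]
    simp [join_ssplit]
  · have hfind : prefixesA.find? (fun q => decide (S.take (ssplit q).length = ssplit q)) = none := by
      rw [List.find?_eq_none]
      intro q hq
      simp only [decide_eq_true_eq]
      intro hqm
      exact hm ⟨q, hq, hqm⟩
    have hgo : goB trieB [] S = none := by
      cases hg : goB trieB [] S with
      | none => rfl
      | some r =>
        obtain ⟨path, hmem, htake, -⟩ := goB_some S trieB [] r hg
        obtain ⟨p, hp, hsp⟩ := trie_paths_sub path hmem
        exact absurd ⟨p, hp, by rw [hsp]; exact htake⟩ hm
    rw [hfind, hgo]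
    rfl

theorem main_eq (profile : String) : extract_shape_py profile = extract_shape_py_alt profile := by
  unfold extract_shape_py extract_shape_py_alt
  by_cases h : profile.toList = []
  · simp [h]
  · simp only [if_neg h]
    rw [splitOn_eq, loopA_eq _ _ prefixes_free]
    obtain ⟨s, t, hS⟩ := ssplit_cons_ex profile.toList
    have hcore := core (ssplit profile.toList)
    rw [hS] at hcore ⊢
    cases hf : (prefixesA.find? fun p => decide ((s :: t).take (ssplit p).length = ssplit p)) with
    | some q =>
      rw [hf] at hcore
      cases hg : goB trieB [] (s :: t) with
      | some r => rw [hg] at hcore; simp at hcore; simp [hcore]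
      | none => rw [hg] at hcore; simp at hcore; simp [hcore]
    | none =>
      rw [hf] at hcore
      cases hg : goB trieB [] (s :: t) with
      | some r => rw [hg] at hcore; simp at hcore; simp [hcore]
      | none => simp

-- ===== VERDICT (by name: the statement is the Claim_ definition above) =====
theorem extract_shape_py_spec : Claim_equal_extract_shape_py := by
  intro profile _
  unfold Spec_extract_shape_py
  exact main_eq profile
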